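-- pv_equiv track=rewrite | github.com/Nobody0321/MyCodes | BS/gen_data_nyt.py | find_pos
-- ===== SOURCE A (Python) =====
-- def find_pos(sentence, head, tail):
-- 	"""find each word's pos to head and tail entity
--
-- 	Args:
-- 		sentence (str): sen str
-- 		head (str): head entity str
-- 		tail (str): tail entity str
-- 	Returns:
-- 		[type]: [description]
-- 	"""
-- 	def find(sentence, entity):
-- 		"""
-- 		find entity index
-- 		"""
-- 		# entity starting pos
-- 		p = sentence.find(' ' + entity + ' ')
-- 		if p == -1:
-- 			# entity part not found
-- 			if sentence[:len(entity) + 1] == entity + ' ':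
-- 				# entity at start
-- 				p = 0
-- 			elif sentence[-len(entity) - 1:] == ' ' + entity:
-- 				# entity at end
-- 				p = len(sentence) - len(entity)
-- 			else:
-- 				p = 0
-- 		else:
-- 			p += 1
-- 		return p
--
-- 	sentence = ' '.join(sentence.split())
-- 	p1 = find(sentence, head)
-- 	p2 = find(sentence, tail)
-- 	words = sentence.split()
-- 	cur_pos = 0
-- 	head_entity_pos = -1
-- 	tail_entity_pos = -1
-- 	for i, word in enumerate(words):
-- 		if cur_pos == p1:
-- 			head_entity_pos = i
-- 		if cur_pos == p2:
-- 			tail_entity_pos = i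
-- 		cur_pos += len(word) + 1
-- 	return head_entity_pos, tail_entity_pos
-- ===== SOURCE B (Python) =====
-- def find_pos(sentence, head, tail):
--     def find(sentence, entity):
--         p = sentence.find(' ' + entity + ' ')
--         if p == -1:
--             if sentence[:len(entity) + 1] == entity + ' ':
--                 p = 0
--             elif sentence[-len(entity) - 1:] == ' ' + entity:
--                 p = len(sentence) - len(entity)
--             else:
--                 p = 0
--         else:
--             p += 1
--         return p
--
--     sentence = ' '.join(sentence.split())
--     n = len(sentence.split())
--
--     def word_index(p):
--         # p is a word index iff it starts a word of the normalized sentence;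
--         # then its word index is the number of spaces before it.
--         if p != 0 and sentence[p - 1] != ' ':
--             return -1
--         i = sentence[:p].count(' ')
--         return i if i < n else -1
--
--     return word_index(find(sentence, head)), word_index(find(sentence, tail))
-- ===== Notes on version B (the rewrite author's own statement) =====
-- stated objective: simpler
-- what changed: A's accumulating for-loop over enumerate(words) with a running character offset is replaced by a closed form per target offset p: p is a word start iff p == 0 or the previous character is a space, and its word index is then sentence[:p].count(' ') (guarded by < len(words)).
import Mathlib
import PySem

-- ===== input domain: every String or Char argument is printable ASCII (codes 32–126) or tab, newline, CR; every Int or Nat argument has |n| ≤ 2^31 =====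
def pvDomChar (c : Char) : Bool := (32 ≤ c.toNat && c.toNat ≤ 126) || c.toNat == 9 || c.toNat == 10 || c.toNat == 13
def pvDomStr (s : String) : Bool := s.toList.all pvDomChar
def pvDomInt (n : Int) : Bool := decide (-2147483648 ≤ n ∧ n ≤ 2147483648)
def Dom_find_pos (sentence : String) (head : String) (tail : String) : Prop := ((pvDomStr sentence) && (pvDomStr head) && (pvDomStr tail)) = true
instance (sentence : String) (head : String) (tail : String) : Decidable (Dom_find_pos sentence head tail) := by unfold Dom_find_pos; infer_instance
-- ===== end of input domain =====

-- B replaces A's accumulating offset loop by a direct closed form (word index = number of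
-- spaces before a word-start offset); objective: simpler.

-- ===== PORT A =====
-- A's inner helper `find(sentence, entity)`; B's Python reuses it verbatim, so both ports share it.
def findEnt (s : String) (entity : String) : Int :=
  let p := PySem.Str.find s (" " ++ entity ++ " ")
  if p = -1 then
    if PySem.Str.slice s none (some (PySem.Str.len entity + 1)) = entity ++ " " then 0
    else if PySem.Str.slice s (some (-(PySem.Str.len entity) - 1)) none = " " ++ entity then
      PySem.Str.len s - PySem.Str.len entity
    else 0
  else p + 1

def find_pos (sentence : String) (head : String) (tail : String) : Int × Int :=
  let s := PySem.Str.join " " (PySem.Str.split₀ sentence)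
  let p1 := findEnt s head
  let p2 := findEnt s tail
  let words := PySem.Str.split₀ s
  -- for i, word in enumerate(words): state ((i, cur_pos), (head_entity_pos, tail_entity_pos))
  let st := words.foldl
    (fun (st : (Int × Int) × (Int × Int)) w =>
      ((st.1.1 + 1, st.1.2 + PySem.Str.len w + 1),
       (if st.1.2 = p1 then st.1.1 else st.2.1,
        if st.1.2 = p2 then st.1.1 else st.2.2)))
    ((0, 0), (-1, -1))
  st.2

-- ===== PORT B =====
-- B's `word_index(p)`: p is a word start iff p == 0 or the previous char is a space;
-- its word index is then the number of spaces before it.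
def wordIndex (s : String) (n : Nat) (p : Int) : Int :=
  if p ≠ 0 ∧ PySem.Str.pyGet? s (p - 1) ≠ some ' ' then -1
  else
    let i : Int := (PySem.Str.count (PySem.Str.slice s none (some p)) " " : Int)
    if i < (n : Int) then i else -1

def find_pos_alt (sentence : String) (head : String) (tail : String) : Int × Int :=
  let s := PySem.Str.join " " (PySem.Str.split₀ sentence)
  let n := (PySem.Str.split₀ s).length
  (wordIndex s n (findEnt s head), wordIndex s n (findEnt s tail))

-- ===== PRECONDITION & SPEC =====
def Spec_find_pos (sentence : String) (head : String) (tail : String) (out : Int × Int) : Prop := out = find_pos_alt sentence head tail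
instance (sentence : String) (head : String) (tail : String) (out : Int × Int) : Decidable (Spec_find_pos sentence head tail out) := by unfold Spec_find_pos; infer_instance

-- ===== CLAIM (what is proved, stated in full; the proofs are below) =====
def Claim_equal_find_pos : Prop := ∀ (sentence : String) (head : String) (tail : String), Dom_find_pos sentence head tail → Spec_find_pos sentence head tail (find_pos sentence head tail)

-- ===== LEMMAS AND PROOFS =====

-- char-level mirror of findEnt
def cFind (s e : List Char) : Int :=
  if PySem.Chars.find s (' ' :: e ++ [' ']) = -1 then
    if PySem.List.slice s none (some ((e.length : Int) + 1)) = e ++ [' '] then 0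
    else if PySem.List.slice s (some (-(e.length : Int) - 1)) none = ' ' :: e then
      (s.length : Int) - (e.length : Int)
    else 0
  else PySem.Chars.find s (' ' :: e ++ [' ']) + 1

lemma findEnt_toList (s e : String) : findEnt s e = cFind s.toList e.toList := by
  simp only [findEnt, cFind, PySem.Str.find_eq, PySem.Str.len_eq, ← String.toList_inj,
    PySem.Str.toList_slice, String.toList_append]
  rfl

-- the single-target accumulator of A's loop
def auxA (p : Int) : List (List Char) → Int → Int → Int → Int
  | [], _, _, acc => acc
  | w :: ws, i, cur, acc => auxA p ws (i + 1) (cur + w.length + 1) (if cur = p then i else acc)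

def loop1 (ws : List (List Char)) (p : Int) : Int := auxA p ws 0 0 (-1)

-- char-level mirror of wordIndex
def bIdx (s : List Char) (n : Nat) (p : Int) : Int :=
  if p ≠ 0 ∧ PySem.List.pyGet? s (p - 1) ≠ some ' ' then -1
  else if ((PySem.Chars.count (PySem.List.slice s none (some p)) [' '] : Int)) < (n : Int) then
    (PySem.Chars.count (PySem.List.slice s none (some p)) [' '] : Int)
  else -1

lemma wordIndex_toList (s : String) (n : Nat) (p : Int) :
    wordIndex s n p = bIdx s.toList n p := by
  simp only [wordIndex, bIdx, PySem.Str.pyGet?_eq, PySem.Chars.pyGet?_eq_listPyGet?,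
    PySem.Str.count_eq, PySem.Str.toList_slice, PySem.Chars.slice_eq_listSlice]
  rw [show (" " : String).toList = [' '] from rfl]

-- A's paired loop projects to two auxA runs
lemma foldl_eq_auxA (p1 p2 : Int) (words : List String) :
    ∀ (i cur h t : Int),
    (words.foldl
      (fun (st : (Int × Int) × (Int × Int)) w =>
        ((st.1.1 + 1, st.1.2 + PySem.Str.len w + 1),
         (if st.1.2 = p1 then st.1.1 else st.2.1,
          if st.1.2 = p2 then st.1.1 else st.2.2)))
      ((i, cur), (h, t))).2
    = (auxA p1 (words.map String.toList) i cur h, auxA p2 (words.map String.toList) i cur t) := by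
  induction words with
  | nil => intro i cur h t; simp [auxA]
  | cons w ws ih =>
      intro i cur h t
      simp only [List.foldl_cons, List.map_cons, auxA, PySem.Str.len_eq, String.length_toList]
      exact ih (i + 1) (cur + w.toList.length + 1) _ _

-- auxA never matches once cur has passed p
lemma auxA_gt (p : Int) : ∀ (ws : List (List Char)) (i cur acc : Int), p < cur →
    auxA p ws i cur acc = acc := by
  intro ws
  induction ws with
  | nil => intro i cur acc _; rfl
  | cons w ws ih =>
      intro i cur acc h
      simp only [auxA, if_neg (by omega : ¬ cur = p)]
      exact ih _ _ _ (by omega)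

-- auxA only compares offsets, so it is shift-invariant
lemma auxA_shift : ∀ (ws : List (List Char)) (p i cur acc : Int),
    auxA p ws i cur acc = auxA (p - cur) ws i 0 acc := by
  intro ws
  induction ws with
  | nil => intro p i cur acc; rfl
  | cons w ws ih =>
      intro p i cur acc
      simp only [auxA]
      rw [ih p (i + 1) (cur + ↑w.length + 1) (if cur = p then i else acc),
          ih (p - cur) (i + 1) (0 + ↑w.length + 1) (if 0 = p - cur then i else acc)]
      have h1 : p - cur - (0 + ↑w.length + 1) = p - (cur + ↑w.length + 1) := by omega
      rw [h1]
      congr 1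
      by_cases h : cur = p
      · rw [if_pos h, if_pos (by omega)]
      · rw [if_neg h, if_neg (by omega)]

lemma auxA_ge (p : Int) : ∀ (ws : List (List Char)) (i cur acc : Int), 0 ≤ i → -1 ≤ acc →
    -1 ≤ auxA p ws i cur acc := by
  intro ws
  induction ws with
  | nil => intro i cur acc _ h; exact h
  | cons w ws ih =>
      intro i cur acc hi ha
      simp only [auxA]
      refine ih _ _ _ (by omega) ?_
      split <;> omega

lemma auxA_abs : ∀ (ws : List (List Char)) (p i acc : Int), 0 ≤ i →
    auxA p ws i 0 acc = if loop1 ws p = -1 then acc else i + loop1 ws p := by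
  intro ws
  induction ws with
  | nil => intro p i acc _; simp [auxA, loop1]
  | cons w ws ih =>
      intro p i acc hi
      have hrec : ∀ (j b : Int), 0 ≤ j → auxA p (w :: ws) j 0 b =
          if loop1 ws (p - (↑w.length + 1)) = -1 then (if (0:Int) = p then j else b)
          else (j + 1) + loop1 ws (p - (↑w.length + 1)) := by
        intro j b hj
        simp only [auxA]
        rw [auxA_shift, show (0 + (w.length:Int) + 1 : Int) = ↑w.length + 1 by omega]
        exact ih (p - (↑w.length + 1)) (j + 1) _ (by omega)
      have hge : -1 ≤ loop1 ws (p - (↑w.length + 1)) :=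
        auxA_ge _ _ 0 0 (-1) (le_refl 0) (le_refl (-1))
      rw [hrec i acc hi]
      show _ = if auxA p (w :: ws) 0 0 (-1) = -1 then acc else i + auxA p (w :: ws) 0 0 (-1)
      rw [hrec 0 (-1) (le_refl 0)]
      split_ifs at * <;> omega

lemma loop1_neg (ws : List (List Char)) (p : Int) (h : p < 0) : loop1 ws p = -1 :=
  auxA_gt p ws 0 0 (-1) h

lemma loop1_cons_zero (w : List Char) (ws : List (List Char)) : loop1 (w :: ws) 0 = 0 := by
  simp only [loop1, auxA]
  exact auxA_gt 0 ws 1 (0 + ↑w.length + 1) 0 (by omega)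

lemma loop1_cons (w : List Char) (ws : List (List Char)) (p : Int) (hp : p ≠ 0) :
    loop1 (w :: ws) p =
      if loop1 ws (p - (↑w.length + 1)) = -1 then -1 else 1 + loop1 ws (p - (↑w.length + 1)) := by
  show auxA p (w :: ws) 0 0 (-1) = _
  simp only [auxA, if_neg (by omega : ¬ (0:Int) = p)]
  rw [auxA_shift, show (0 + (w.length:Int) + 1 : Int) = ↑w.length + 1 by omega]
  simpa using auxA_abs ws (p - (↑w.length + 1)) 1 (-1) (by omega)

-- Chars.count with a single-character needle is List.count
lemma countGo_single (c : Char) : ∀ (fuel : Nat) (l : List Char) (acc : Nat), l.length ≤ fuel →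
    PySem.Chars.count.go [c] fuel l acc = acc + l.count c := by
  intro fuel
  induction fuel with
  | zero =>
      intro l acc h
      rw [PySem.Chars.count.go]
      cases l with
      | nil => simp
      | cons a t => simp at h
  | succ n ih =>
      intro l acc h
      cases l with
      | nil =>
          rw [PySem.Chars.count.go]
          simp
          omega
      | cons a t =>
          rw [PySem.Chars.count.go]
          simp only [List.length_cons] at h
          by_cases hac : a = c
          · subst hac
            simp [List.isPrefixOf, ih t (acc + 1) (by omega)]
            omega
          · simp [List.isPrefixOf, hac, ih t acc (by omega), Ne.symm hac]

lemma count_single (s : List Char) (c : Char) :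
    PySem.Chars.count s [c] = s.count c := by
  have h : ([c] : List Char).isEmpty = false := rfl
  rw [PySem.Chars.count, h]
  simpa using countGo_single c s.length s 0 (le_refl _)

-- words produced by split() are nonempty and whitespace-free
def goodW (ws : List (List Char)) : Prop :=
  ∀ w ∈ ws, w ≠ [] ∧ ∀ c ∈ w, PySem.Chars.isspace c = false

lemma split₀go_good : ∀ (s cur : List Char) (acc : List (List Char)),
    (∀ c ∈ cur, PySem.Chars.isspace c = false) →
    (∀ w ∈ acc, w ≠ [] ∧ ∀ c ∈ w, PySem.Chars.isspace c = false) →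
    goodW (PySem.Chars.split₀.go s cur acc) := by
  intro s
  induction s with
  | nil =>
      intro cur acc hcur hacc
      rw [PySem.Chars.split₀.go]
      intro w hw
      by_cases hc : cur.isEmpty
      · rw [if_pos hc] at hw
        simp only [List.mem_reverse] at hw
        exact hacc w hw
      · rw [if_neg hc] at hw
        simp only [List.mem_reverse, List.mem_cons] at hw
        rcases hw with h | h
        · subst h
          constructor
          · simp only [ne_eq, List.reverse_eq_nil_iff]
            intro h; rw [h] at hc; exact hc rfl
          · intro c hc'; exact hcur c (List.mem_reverse.mp hc')
        · exact hacc w h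
  | cons a rest ih =>
      intro cur acc hcur hacc
      rw [PySem.Chars.split₀.go]
      by_cases hs : PySem.Chars.isspace a
      · rw [if_pos hs]
        by_cases hc : cur.isEmpty
        · rw [if_pos hc]
          exact ih [] acc (by simp) hacc
        · rw [if_neg hc]
          refine ih [] _ (by simp) ?_
          intro w hw
          rcases List.mem_cons.mp hw with h | h
          · subst h
            refine ⟨by simp only [ne_eq, List.reverse_eq_nil_iff]; intro h; rw [h] at hc; exact hc rfl, ?_⟩
            intro c hc'; exact hcur c (List.mem_reverse.mp hc')
          · exact hacc w h
      · rw [if_neg hs]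
        refine ih (a :: cur) acc ?_ hacc
        intro c hc'
        rcases List.mem_cons.mp hc' with h | h
        · subst h; simpa using hs
        · exact hcur c h

lemma split₀_good (s : List Char) : goodW (PySem.Chars.split₀ s) :=
  split₀go_good s [] [] (by simp) (by simp)

lemma split₀go_word : ∀ (w : List Char), (∀ c ∈ w, PySem.Chars.isspace c = false) →
    ∀ (rest cur : List Char) (acc : List (List Char)),
    PySem.Chars.split₀.go (w ++ rest) cur acc = PySem.Chars.split₀.go rest (w.reverse ++ cur) acc := by
  intro w
  induction w with
  | nil => intro _ rest cur acc; simp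
  | cons a t ih =>
      intro hg rest cur acc
      have ha : PySem.Chars.isspace a = false := hg a (by simp)
      rw [List.cons_append, PySem.Chars.split₀.go, if_neg (by simp [ha])]
      rw [ih (fun c hc => hg c (by simp [hc])) rest (a :: cur) acc]
      simp

lemma split₀go_join : ∀ (ws : List (List Char)), goodW ws → ∀ (acc : List (List Char)),
    PySem.Chars.split₀.go (PySem.Chars.join [' '] ws) [] acc = acc.reverse ++ ws := by
  intro ws
  induction ws with
  | nil =>
      intro _ acc
      rw [PySem.Chars.join_nil, PySem.Chars.split₀.go]
      simp
  | cons w ws ih =>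
      intro hg acc
      have hw := hg w (by simp)
      have hwr : w.reverse.isEmpty = false := by
        simp only [List.isEmpty_eq_false_iff, ne_eq, List.reverse_eq_nil_iff]
        exact hw.1
      cases ws with
      | nil =>
          rw [PySem.Chars.join_singleton]
          rw [show w = w ++ [] from (List.append_nil w).symm]
          rw [split₀go_word w hw.2 [] [] acc]
          rw [PySem.Chars.split₀.go]
          simp [hwr]
      | cons w2 ws2 =>
          rw [PySem.Chars.join_cons_cons]
          rw [show w ++ [' '] ++ PySem.Chars.join [' '] (w2 :: ws2)
                = w ++ (' ' :: PySem.Chars.join [' '] (w2 :: ws2)) by simp]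
          rw [split₀go_word w hw.2 _ [] acc]
          rw [PySem.Chars.split₀.go, if_pos (by decide), List.append_nil, if_neg (by simp [hwr])]
          rw [ih (fun x hx => hg x (by simp [hx])) _]
          simp

lemma split₀_join (ws : List (List Char)) (hg : goodW ws) :
    PySem.Chars.split₀ (PySem.Chars.join [' '] ws) = ws := by
  rw [PySem.Chars.split₀, split₀go_join ws hg []]
  rfl

-- the find helper never returns a negative offset
lemma cFind_nonneg (s e : List Char) : 0 ≤ cFind s e := by
  unfold cFind
  have h1 := PySem.Chars.neg_one_le_find s (' ' :: e ++ [' '])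
  split_ifs with hA hB hC
  · omega
  · -- end-of-sentence branch: the slice equality forces e.length + 1 ≤ s.length
    rw [show (-(e.length : Int) - 1) = -((e.length + 1 : Nat) : Int) by push_cast; ring] at hC
    rw [PySem.List.slice_from_neg_natCast s (e.length + 1) (by omega)] at hC
    have h2 := congrArg List.length hC
    simp only [List.length_drop, List.length_cons] at h2
    omega
  · omega
  · omega

-- B's closed form at an offset inside (or past) the first word: not a word start
lemma bIdx_first (w rest : List Char) (hwsp : (' ' : Char) ∉ w) (n : Nat) (p : Int)
    (hp1 : 1 ≤ p) (hple : p ≤ (w.length : Int)) :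
    bIdx (w ++ rest) n p = -1 := by
  simp only [bIdx]
  rw [if_pos]
  refine ⟨by omega, ?_⟩
  rw [show p - 1 = (((p - 1).toNat : Nat) : Int) by omega, PySem.List.pyGet?_natCast]
  have hkw : (p - 1).toNat < w.length := by omega
  rw [List.getElem?_append_left hkw, List.getElem?_eq_getElem hkw]
  intro hc
  have hmem : w[(p - 1).toNat] ∈ w := List.getElem_mem hkw
  simp only [Option.some.injEq] at hc
  rw [hc] at hmem
  exact hwsp hmem

-- B's closed form past the end of the sentence: not a word start
lemma bIdx_past (s : List Char) (n : Nat) (p : Int) (hp1 : 1 ≤ p)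
    (hgt : (s.length : Int) < p) : bIdx s n p = -1 := by
  simp only [bIdx]
  rw [if_pos]
  refine ⟨by omega, ?_⟩
  rw [show p - 1 = (((p - 1).toNat : Nat) : Int) by omega, PySem.List.pyGet?_natCast]
  rw [List.getElem?_eq_none (by omega)]
  simp

-- B's closed form steps over the first word of a normalized sentence
lemma bIdx_step (w s' : List Char) (hwsp : (' ' : Char) ∉ w) (n : Nat) (p : Int)
    (hp : (w.length : Int) + 1 ≤ p) :
    bIdx (w ++ ' ' :: s') (n + 1) p =
      (if bIdx s' n (p - ((w.length : Int) + 1)) = -1 then -1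
       else 1 + bIdx s' n (p - ((w.length : Int) + 1))) := by
  set p' : Int := p - ((w.length : Int) + 1) with hp'
  have hp'0 : 0 ≤ p' := by omega
  -- the guards agree
  have hguard : (p ≠ 0 ∧ PySem.List.pyGet? (w ++ ' ' :: s') (p - 1) ≠ some ' ')
      ↔ (p' ≠ 0 ∧ PySem.List.pyGet? s' (p' - 1) ≠ some ' ') := by
    by_cases hpz : p' = 0
    · have hpl : p - 1 = ((w.length : Nat) : Int) := by omega
      rw [hpl, PySem.List.pyGet?_natCast, List.getElem?_append_right (le_refl _)]
      simp [hpz]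
    · have h1p' : 1 ≤ p' := by omega
      set k' : Nat := (p' - 1).toNat with hk'def
      have hk' : p' - 1 = ((k' : Nat) : Int) := by omega
      have hk : p - 1 = ((w.length + 1 + k' : Nat) : Int) := by push_cast; omega
      rw [hk', hk, PySem.List.pyGet?_natCast, PySem.List.pyGet?_natCast,
        List.getElem?_append_right (by omega)]
      have hsub : w.length + 1 + k' - w.length = k' + 1 := by omega
      rw [hsub, List.getElem?_cons_succ]
      constructor
      · rintro ⟨_, h⟩; exact ⟨hpz, h⟩
      · rintro ⟨_, h⟩; exact ⟨by omega, h⟩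
  -- the space counts shift by one
  have hcount : PySem.Chars.count (PySem.List.slice (w ++ ' ' :: s') none (some p)) [' ']
      = PySem.Chars.count (PySem.List.slice s' none (some p')) [' '] + 1 := by
    rw [PySem.List.slice_to _ (by omega : (0:Int) ≤ p), PySem.List.slice_to _ hp'0]
    have hpt : p.toNat = w.length + (1 + p'.toNat) := by omega
    rw [hpt, List.take_append]
    rw [List.take_of_length_le (by omega), show w.length + (1 + p'.toNat) - w.length = p'.toNat + 1 by omega]
    rw [List.take_succ_cons, count_single, count_single, List.count_append, List.count_cons_self]
    have hw0 : w.count ' ' = 0 := List.count_eq_zero.mpr hwsp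
    omega
  simp only [bIdx]
  by_cases hg : p' ≠ 0 ∧ PySem.List.pyGet? s' (p' - 1) ≠ some ' '
  · rw [if_pos (hguard.mpr hg), if_pos hg]
    simp
  · rw [if_neg (fun h => hg (hguard.mp h)), if_neg hg, hcount]
    push_cast
    split_ifs <;> first | omega | exact (‹False›).elim

-- ===== the central lemma: A's loop equals B's closed form on a normalized sentence =====
lemma loop1_eq_bIdx : ∀ (ws : List (List Char)), goodW ws → ∀ (p : Int), 0 ≤ p →
    loop1 ws p = bIdx (PySem.Chars.join [' '] ws) ws.length p := by
  intro ws
  induction ws with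
  | nil =>
      intro _ p hp
      rw [PySem.Chars.join_nil]
      by_cases hp0 : p = 0
      · subst hp0
        simp [loop1, auxA, bIdx, count_single]
      · show (-1 : Int) = _
        simp only [bIdx]
        rw [if_pos]
        refine ⟨hp0, ?_⟩
        rw [show p - 1 = (((p - 1).toNat : Nat) : Int) by omega, PySem.List.pyGet?_natCast]
        simp
  | cons w ws ih =>
      intro hg p hp
      have hw := hg w (by simp)
      have hgws : goodW ws := fun x hx => hg x (by simp [hx])
      have hwsp : (' ' : Char) ∉ w := by
        intro hmem
        have h := hw.2 ' ' hmem
        have hsp : PySem.Chars.isspace ' ' = true := by decide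
        rw [h] at hsp
        simp at hsp
      by_cases hp0 : p = 0
      · subst hp0
        rw [loop1_cons_zero]
        simp only [bIdx, ne_eq, not_true_eq_false, false_and, if_false]
        rw [PySem.List.slice_to _ (le_refl 0)]
        simp [count_single]
      · have hp1 : 1 ≤ p := by omega
        rw [loop1_cons w ws p hp0]
        cases ws with
        | nil =>
            rw [show loop1 [] (p - (↑w.length + 1)) = -1 from rfl, if_pos rfl,
              PySem.Chars.join_singleton]
            by_cases hple : p ≤ (w.length : Int)
            · rw [show w = w ++ ([] : List Char) from (List.append_nil w).symm]
              exact (bIdx_first w [] hwsp _ p hp1 (by simpa using hple)).symm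
            · exact (bIdx_past w _ p hp1 (by omega)).symm
        | cons w2 ws2 =>
            have hjoin : PySem.Chars.join [' '] (w :: w2 :: ws2)
                = w ++ ' ' :: PySem.Chars.join [' '] (w2 :: ws2) := by
              rw [PySem.Chars.join_cons_cons]; simp
            rw [hjoin]
            by_cases hple : p ≤ (w.length : Int)
            · rw [loop1_neg _ _ (by omega), if_pos rfl]
              exact (bIdx_first w _ hwsp _ p hp1 hple).symm
            · have hpw : (w.length : Int) + 1 ≤ p := by omega
              rw [show (w :: w2 :: ws2).length = (w2 :: ws2).length + 1 from rfl]
              rw [bIdx_step w _ hwsp _ p hpw]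
              rw [ih hgws (p - (↑w.length + 1)) (by omega)]

-- bridging the two ports to loop1 / bIdx
lemma norm_toList (sentence : String) :
    (PySem.Str.join " " (PySem.Str.split₀ sentence)).toList
      = PySem.Chars.join [' '] (PySem.Chars.split₀ sentence.toList) := by
  rw [PySem.Str.toList_join, PySem.Str.split₀_map_toList]
  rfl

lemma words_toList (sentence : String) :
    (PySem.Str.split₀ (PySem.Str.join " " (PySem.Str.split₀ sentence))).map String.toList
      = PySem.Chars.split₀ sentence.toList := by
  rw [PySem.Str.split₀_map_toList, norm_toList,
    split₀_join _ (split₀_good sentence.toList)]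

lemma find_pos_eq (sentence head tail : String) :
    find_pos sentence head tail =
      (loop1 (PySem.Chars.split₀ sentence.toList)
         (cFind (PySem.Chars.join [' '] (PySem.Chars.split₀ sentence.toList)) head.toList),
       loop1 (PySem.Chars.split₀ sentence.toList)
         (cFind (PySem.Chars.join [' '] (PySem.Chars.split₀ sentence.toList)) tail.toList)) := by
  simp only [find_pos]
  rw [foldl_eq_auxA, words_toList, findEnt_toList, findEnt_toList, norm_toList]
  rfl

lemma find_pos_alt_eq (sentence head tail : String) :
    find_pos_alt sentence head tail =
      (bIdx (PySem.Chars.join [' '] (PySem.Chars.split₀ sentence.toList))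
         (PySem.Chars.split₀ sentence.toList).length
         (cFind (PySem.Chars.join [' '] (PySem.Chars.split₀ sentence.toList)) head.toList),
       bIdx (PySem.Chars.join [' '] (PySem.Chars.split₀ sentence.toList))
         (PySem.Chars.split₀ sentence.toList).length
         (cFind (PySem.Chars.join [' '] (PySem.Chars.split₀ sentence.toList)) tail.toList)) := by
  simp only [find_pos_alt]
  rw [wordIndex_toList, wordIndex_toList, findEnt_toList, findEnt_toList, norm_toList]
  rw [show (PySem.Str.split₀ (PySem.Str.join " " (PySem.Str.split₀ sentence))).length
        = (PySem.Chars.split₀ sentence.toList).length by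
      rw [← words_toList sentence, List.length_map]]

-- ===== VERDICT (by name: the statement is the Claim_ definition above) =====
theorem find_pos_spec : Claim_equal_find_pos := by
  intro sentence head tail _
  unfold Spec_find_pos
  rw [find_pos_eq, find_pos_alt_eq]
  have hg := split₀_good sentence.toList
  have hn : PySem.Chars.join [' '] (PySem.Chars.split₀ sentence.toList)
      = PySem.Chars.join [' '] (PySem.Chars.split₀ sentence.toList) := rfl
  exact Prod.ext
    (loop1_eq_bIdx _ hg _ (cFind_nonneg _ _))
    (loop1_eq_bIdx _ hg _ (cFind_nonneg _ _))
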